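-- pv_equiv track=rewrite | github.com/AnyTHIW/JGCoding | 프로그래머스/1/42862. 체육복/체육복.py | solution
-- ===== SOURCE A (Python) =====
-- def solution(n, lost, reserve):
--     answer = 0
--
--     lostSet = set(lost) - set(reserve)
--     reserveSet = set(reserve) - set(lost)
--
--     for res in sorted(reserveSet):
--         if (res-1) in lostSet:
--             lostSet.remove(res-1)
--         elif (res+1) in lostSet:
--             lostSet.remove(res+1)
--
--     answer = n - len(lostSet)
--
--     return answer
-- ===== SOURCE B (Python) =====
-- def solution(n, lost, reserve):
--     L = sorted(set(lost) - set(reserve))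
--     R = sorted(set(reserve) - set(lost))
--     i = j = m = 0
--     while i < len(L) and j < len(R):
--         d = L[i] - R[j]
--         if -1 <= d <= 1:
--             m += 1
--             i += 1
--             j += 1
--         elif d < 0:
--             i += 1
--         else:
--             j += 1
--     return n - (len(L) - m)
-- ===== Notes on version B (the rewrite author's own statement) =====
-- stated objective: alternative
-- what changed: Replaces the per-reserve greedy that mutates a lost-set (membership test and removal for each sorted reserve) by a single two-pointer merge scan over the two sorted disjoint lists, counting matched adjacent pairs directly.
import Mathlib
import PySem

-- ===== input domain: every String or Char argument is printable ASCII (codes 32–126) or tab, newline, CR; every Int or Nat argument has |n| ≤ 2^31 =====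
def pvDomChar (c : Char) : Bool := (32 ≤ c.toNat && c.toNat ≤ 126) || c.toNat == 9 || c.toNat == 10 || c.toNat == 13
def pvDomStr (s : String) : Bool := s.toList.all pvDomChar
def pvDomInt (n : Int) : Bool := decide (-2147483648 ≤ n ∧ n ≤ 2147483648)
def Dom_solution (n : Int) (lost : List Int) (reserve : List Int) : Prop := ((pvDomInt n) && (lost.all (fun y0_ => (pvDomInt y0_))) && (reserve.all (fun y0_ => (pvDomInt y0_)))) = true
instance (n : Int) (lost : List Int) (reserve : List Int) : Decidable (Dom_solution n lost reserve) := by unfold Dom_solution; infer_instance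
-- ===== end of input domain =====

-- A's greedy (for each sorted reserve, pull res-1 else res+1 out of a lost-set) vs B: one
-- two-pointer merge scan over the two sorted disjoint lists counting matched pairs (alternative).


-- ===== PORT A =====
-- loop body of A: if (res-1) in lostSet: lostSet.remove(res-1) elif (res+1) in lostSet: lostSet.remove(res+1)
def solutionStep (s : PySem.Set Int) (res : Int) : PySem.Set Int :=
  if s.contains (res - 1) then (s.remove? (res - 1)).getD s
  else if s.contains (res + 1) then (s.remove? (res + 1)).getD s
  else s

def solution (n : Int) (lost : List Int) (reserve : List Int) : Int :=
  let lostSet := PySem.Set.diff (PySem.Set.ofList lost) (PySem.Set.ofList reserve)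
  let reserveSet := PySem.Set.diff (PySem.Set.ofList reserve) (PySem.Set.ofList lost)
  let final := (PySem.List.sorted reserveSet (fun x => x)).foldl solutionStep lostSet
  n - PySem.Set.len final

-- ===== PORT B =====
-- the two-pointer while loop of B, consuming the lists in place of the indices i, j
def twoPtrCount : List Int → List Int → Int
  | [], _ => 0
  | _ :: _, [] => 0
  | l :: L, r :: R =>
    let d := l - r
    if -1 ≤ d ∧ d ≤ 1 then 1 + twoPtrCount L R
    else if d < 0 then twoPtrCount L (r :: R)
    else twoPtrCount (l :: L) R
  termination_by L R => L.length + R.length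

def solution_alt (n : Int) (lost : List Int) (reserve : List Int) : Int :=
  let L := PySem.List.sorted (PySem.Set.diff (PySem.Set.ofList lost) (PySem.Set.ofList reserve)) (fun x => x)
  let R := PySem.List.sorted (PySem.Set.diff (PySem.Set.ofList reserve) (PySem.Set.ofList lost)) (fun x => x)
  n - ((L.length : Int) - twoPtrCount L R)

-- ===== PRECONDITION & SPEC =====
def Spec_solution (n : Int) (lost : List Int) (reserve : List Int) (out : Int) : Prop := out = solution_alt n lost reserve
instance (n : Int) (lost : List Int) (reserve : List Int) (out : Int) : Decidable (Spec_solution n lost reserve out) := by unfold Spec_solution; infer_instance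

-- ===== CLAIM (what is proved, stated in full; the proofs are below) =====
def Claim_equal_solution : Prop := ∀ (n : Int) (lost : List Int) (reserve : List Int), Dom_solution n lost reserve → Spec_solution n lost reserve (solution n lost reserve)

-- ===== LEMMAS AND PROOFS =====

-- number of removals A's loop performs, as a recursion over the reserve list
def aCount : PySem.Set Int → List Int → Int
  | _, [] => 0
  | s, r :: R =>
    if (r - 1) ∈ s then 1 + aCount (s.discard (r - 1)) R
    else if (r + 1) ∈ s then 1 + aCount (s.discard (r + 1)) R
    else aCount s R
  termination_by _ R => R.length

theorem solutionStep_eq (s : PySem.Set Int) (r : Int) :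
    solutionStep s r =
      if (r - 1) ∈ s then s.discard (r - 1)
      else if (r + 1) ∈ s then s.discard (r + 1) else s := by
  unfold solutionStep
  by_cases h1 : (r - 1) ∈ s
  · simp [h1, PySem.Set.remove?_of_mem h1]
  · have hc1 : s.contains (r - 1) = false :=
      Bool.eq_false_iff.2 (fun h => h1 ((PySem.Set.contains_iff _ _).1 h))
    by_cases h2 : (r + 1) ∈ s
    · simp [h1, h2, PySem.Set.remove?_of_mem h2]
    · have hc2 : s.contains (r + 1) = false :=
        Bool.eq_false_iff.2 (fun h => h2 ((PySem.Set.contains_iff _ _).1 h))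
      simp [h1, h2]

theorem length_discard_of_mem {s : List Int} {x : Int} (hnd : s.Nodup) (hx : x ∈ s) :
    ((PySem.Set.discard s x).length : Int) = (s.length : Int) - 1 := by
  have h1 : PySem.Set.discard s x = s.erase x := by
    rw [List.Nodup.erase_eq_filter hnd]
    unfold PySem.Set.discard
    congr 1
  have h2 : (s.erase x).length = s.length - 1 := List.length_erase_of_mem hx
  have h3 : 1 ≤ s.length := List.length_pos_of_mem hx
  rw [h1, h2]
  omega

theorem nodup_discard' {s : List Int} (hnd : s.Nodup) (x : Int) :
    (PySem.Set.discard s x).Nodup := PySem.Set.nodup_discard s x hnd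

-- A's loop shrinks the set by exactly aCount elements
theorem len_foldl_step (R : List Int) : ∀ (s : PySem.Set Int), s.Nodup →
    ((List.foldl solutionStep s R).length : Int) = (s.length : Int) - aCount s R := by
  induction R with
  | nil => intro s _; simp [aCount]
  | cons r R ih =>
    intro s hnd
    rw [List.foldl_cons, solutionStep_eq]
    by_cases h1 : (r - 1) ∈ s
    · rw [if_pos h1]
      rw [ih _ (nodup_discard' hnd _), length_discard_of_mem hnd h1]
      simp [aCount, h1]; ring
    · rw [if_neg h1]
      by_cases h2 : (r + 1) ∈ s
      · rw [if_pos h2]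
        rw [ih _ (nodup_discard' hnd _), length_discard_of_mem hnd h2]
        simp [aCount, h1, h2]; ring
      · rw [if_neg h2, ih _ hnd]
        simp [aCount, h1, h2]

-- aCount only looks at s as a set: it is invariant under permutation
theorem aCount_perm (R : List Int) : ∀ (s s' : List Int), s.Perm s' →
    aCount s R = aCount s' R := by
  induction R with
  | nil => intro s s' _; simp [aCount]
  | cons r R ih =>
    intro s s' hp
    have hmem : ∀ x : Int, x ∈ s ↔ x ∈ s' := fun x => hp.mem_iff
    have hfilt : ∀ x : Int, (PySem.Set.discard s x).Perm (PySem.Set.discard s' x) :=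
      fun x => hp.filter _
    by_cases h1 : (r - 1) ∈ s
    · rw [aCount, aCount, if_pos h1, if_pos ((hmem _).1 h1), ih _ _ (hfilt _)]
    · have h1' : (r - 1) ∉ s' := fun h => h1 ((hmem _).2 h)
      by_cases h2 : (r + 1) ∈ s
      · rw [aCount, aCount, if_neg h1, if_neg h1', if_pos h2,
          if_pos ((hmem _).1 h2), ih _ _ (hfilt _)]
      · have h2' : (r + 1) ∉ s' := fun h => h2 ((hmem _).2 h)
        rw [aCount, aCount, if_neg h1, if_neg h1', if_neg h2, if_neg h2', ih _ _ hp]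

-- if l is below every r-1 of R it can never be matched nor tested: dropping it changes nothing
theorem aCount_cons_small (R : List Int) : ∀ (l : Int) (S : List Int),
    (∀ r ∈ R, l < r - 1) → aCount (l :: S) R = aCount S R := by
  induction R with
  | nil => intro l S _; simp [aCount]
  | cons r R ih =>
    intro l S hsmall
    have hl : l < r - 1 := hsmall r (by simp)
    have h1 : (r - 1 ∈ (l :: S)) ↔ (r - 1) ∈ S := by
      simp; intro h; omega
    have h2 : (r + 1 ∈ (l :: S)) ↔ (r + 1) ∈ S := by
      simp; intro h; omega
    have hfilt : ∀ x : Int, l ≠ x → PySem.Set.discard (l :: S) x = l :: PySem.Set.discard S x := by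
      intro x hne
      unfold PySem.Set.discard
      simp [hne]
    have htail : ∀ r' ∈ R, l < r' - 1 := fun r' hr' => hsmall r' (by simp [hr'])
    by_cases hm1 : (r - 1) ∈ S
    · rw [aCount, aCount, if_pos (h1.2 hm1), if_pos hm1,
        hfilt _ (by omega), ih _ _ htail]
    · by_cases hm2 : (r + 1) ∈ S
      · rw [aCount, aCount, if_neg (fun h => hm1 (h1.1 h)), if_neg hm1,
          if_pos (h2.2 hm2), if_pos hm2, hfilt _ (by omega), ih _ _ htail]
      · rw [aCount, aCount, if_neg (fun h => hm1 (h1.1 h)), if_neg hm1,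
          if_neg (fun h => hm2 (h2.1 h)), if_neg hm2, ih _ _ htail]

-- the heart: on sorted, strictly increasing, disjoint lists the two greedies count alike
theorem aCount_eq_twoPtr_aux : ∀ (N : Nat) (S R : List Int), S.length + R.length ≤ N →
    S.Pairwise (· < ·) → R.Pairwise (· < ·) →
    (∀ x ∈ S, x ∉ R) → aCount S R = twoPtrCount S R := by
  intro N
  induction N with
  | zero =>
    intro S R hlen _ _ _
    have hS : S = [] := List.eq_nil_of_length_eq_zero (by omega)
    have hR : R = [] := List.eq_nil_of_length_eq_zero (by omega)
    subst hS; subst hR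
    simp [aCount, twoPtrCount]
  | succ N ih =>
    intro S R hlen hS hR hdisj
    match S, R with
    | [], R =>
      have hz : ∀ R' : List Int, aCount ([] : List Int) R' = 0 := by
        intro R'
        induction R' with
        | nil => simp [aCount]
        | cons r R' ihz => rw [aCount]; simpa using ihz
      cases R with
      | nil => simp [hz, twoPtrCount]
      | cons r R => simp [hz, twoPtrCount]
    | l :: L, [] => simp [aCount, twoPtrCount]
    | l :: L, r :: R =>
      have hlr : l ≠ r := fun h => hdisj l (by simp) (by simp [h])
      have hSmem : ∀ x ∈ L, l < x := fun x hx => (List.pairwise_cons.1 hS).1 x hx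
      have hRmem : ∀ x ∈ R, r < x := fun x hx => (List.pairwise_cons.1 hR).1 x hx
      have hStail : L.Pairwise (· < ·) := (List.pairwise_cons.1 hS).2
      have hRtail : R.Pairwise (· < ·) := (List.pairwise_cons.1 hR).2
      simp only [List.length_cons] at hlen
      by_cases hm : -1 ≤ l - r ∧ l - r ≤ 1
      · rw [twoPtrCount, if_pos hm]
        have ih' : aCount L R = twoPtrCount L R :=
          ih L R (by omega) hStail hRtail
            (fun x hx hx' => hdisj x (by simp [hx]) (by simp [hx']))
        rcases (by omega : l = r - 1 ∨ l = r + 1) with hcase | hcase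
        · subst hcase
          have hdisc : PySem.Set.discard ((r - 1) :: L) (r - 1) = L := by
            unfold PySem.Set.discard
            simp
            intro a ha h
            exact absurd (hSmem a ha) (by omega)
          rw [aCount, if_pos (by simp), hdisc, ih']
        · subst hcase
          have h1 : (r - 1) ∉ ((r + 1) :: L) := by
            simp only [List.mem_cons, not_or]
            exact ⟨by omega, fun h => absurd (hSmem _ h) (by omega)⟩
          have hdisc : PySem.Set.discard ((r + 1) :: L) (r + 1) = L := by
            unfold PySem.Set.discard
            simp
            intro a ha h
            exact absurd (hSmem a ha) (by omega)
          rw [aCount, if_neg h1, if_pos (by simp), hdisc, ih']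
      · by_cases hlt : l - r < 0
        · have hl : l < r - 1 := by omega
          have hsmall : ∀ r' ∈ (r :: R), l < r' - 1 := by
            intro r' hr'
            rcases List.mem_cons.1 hr' with h | h
            · omega
            · have := hRmem r' h; omega
          rw [twoPtrCount, if_neg hm, if_pos hlt,
            aCount_cons_small _ _ _ hsmall]
          exact ih L (r :: R) (by simp; omega) hStail hR
            (fun x hx hx' => hdisj x (by simp [hx]) hx')
        · have hgt : r + 1 < l := by omega
          have h1 : (r - 1) ∉ (l :: L) := by
            simp only [List.mem_cons, not_or]
            exact ⟨by omega, fun h => absurd (hSmem _ h) (by omega)⟩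
          have h2 : (r + 1) ∉ (l :: L) := by
            simp only [List.mem_cons, not_or]
            exact ⟨by omega, fun h => absurd (hSmem _ h) (by omega)⟩
          rw [twoPtrCount, if_neg hm, if_neg hlt, aCount, if_neg h1, if_neg h2]
          exact ih (l :: L) R (by simp; omega) hS hRtail
            (fun x hx hx' => hdisj x hx (by simp [hx']))

theorem aCount_eq_twoPtr (S R : List Int) (hS : S.Pairwise (· < ·))
    (hR : R.Pairwise (· < ·)) (hdisj : ∀ x ∈ S, x ∉ R) :
    aCount S R = twoPtrCount S R :=
  aCount_eq_twoPtr_aux (S.length + R.length) S R le_rfl hS hR hdisj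

-- sorted set is strictly increasing
theorem sorted_strict {s : List Int} (hnd : s.Nodup) :
    (PySem.List.sorted s (fun x => x)).Pairwise (· < ·) := by
  have h1 := PySem.List.sorted_pairwise s (fun x => x)
  have h2 : (PySem.List.sorted s (fun x => x)).Nodup :=
    (PySem.List.sorted_perm s (fun x => x) false).nodup_iff.2 hnd
  exact (h1.and h2).imp (fun h => lt_of_le_of_ne h.1 h.2)

-- ===== VERDICT (by name: the statement is the Claim_ definition above) =====
theorem solution_spec : Claim_equal_solution := by
  intro n lost reserve _
  unfold Spec_solution solution solution_alt
  dsimp only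
  have hndL : (PySem.Set.diff (PySem.Set.ofList lost) (PySem.Set.ofList reserve)).Nodup :=
    PySem.Set.nodup_diff _ _ (PySem.Set.nodup_ofList lost)
  have hndR : (PySem.Set.diff (PySem.Set.ofList reserve) (PySem.Set.ofList lost)).Nodup :=
    PySem.Set.nodup_diff _ _ (PySem.Set.nodup_ofList reserve)
  set lostSet := PySem.Set.diff (PySem.Set.ofList lost) (PySem.Set.ofList reserve) with hls
  set resSet := PySem.Set.diff (PySem.Set.ofList reserve) (PySem.Set.ofList lost) with hrs
  set L := PySem.List.sorted lostSet (fun x => x) with hL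
  set R := PySem.List.sorted resSet (fun x => x) with hR
  have hpermL : L.Perm lostSet := PySem.List.sorted_perm _ _ _
  have hdisj : ∀ x ∈ L, x ∉ R := by
    intro x hx hx'
    have h1 : x ∈ lostSet := hpermL.mem_iff.1 hx
    have h2 : x ∈ resSet := (PySem.List.sorted_perm resSet (fun x => x) false).mem_iff.1 hx'
    rw [hls] at h1; rw [hrs] at h2
    exact ((PySem.Set.mem_diff _ _ _).1 h1).2 ((PySem.Set.mem_diff _ _ _).1 h2).1
  have hlen : ((List.foldl solutionStep lostSet R).length : Int)
      = (lostSet.length : Int) - aCount lostSet R := len_foldl_step R lostSet hndL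
  have hac : aCount lostSet R = aCount L R := aCount_perm R lostSet L hpermL.symm
  have hmain : aCount L R = twoPtrCount L R :=
    aCount_eq_twoPtr L R (sorted_strict hndL) (sorted_strict hndR) hdisj
  have hlenL : lostSet.length = L.length := hpermL.length_eq.symm
  have hlenfinal : PySem.Set.len (List.foldl solutionStep lostSet R) =
      ((List.foldl solutionStep lostSet R).length : Int) := rfl
  rw [hlenfinal, hlen, hac, hmain, hlenL]
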